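-- pv_equiv track=rewrite | github.com/abelguevara-upeu/bi-project | scripts/deploy_to_aiven.py | split_sql_tuple_values
-- ===== SOURCE A (Python) =====
-- def split_sql_tuple_values(s):
--     """Split a SQL tuple like: 1,'a, b',NULL,0 into a list of values, handling single quotes.
--     This is a simple parser: it supports single-quoted strings with doubled-quote escaping.
--     """
--     vals = []
--     cur = []
--     i = 0
--     length = len(s)
--     while i < length:
--         ch = s[i]
--         if ch == "'":
--             cur.append(ch)
--             i += 1
--             # inside quoted string: copy until closing quote (handle doubled '')
--             while i < length:
--                 cur.append(s[i])
--                 if s[i] == "'":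
--                     if i + 1 < length and s[i + 1] == "'":
--                         # escaped quote, consume both
--                         i += 2
--                         cur.append("'")
--                         continue
--                     else:
--                         i += 1
--                         break
--                 i += 1
--             continue
--         if ch == ',':
--             vals.append(''.join(cur).strip())
--             cur = []
--             i += 1
--             continue
--         else:
--             cur.append(ch)
--             i += 1
--     if cur:
--         vals.append(''.join(cur).strip())
--     return vals
-- ===== SOURCE B (Python) =====
-- def split_sql_tuple_values(s):
--     """Split a SQL tuple like: 1,'a, b',NULL,0 into a list of values, handling single quotes.
--     Single flat pass: a quote parity flag replaces the nested copy loop (a doubled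
--     quote simply toggles out and back in), so no lookahead is needed."""
--     vals = []
--     buf = []
--     in_quote = False
--     for ch in s:
--         if ch == ',' and not in_quote:
--             vals.append(''.join(buf).strip())
--             buf = []
--         else:
--             buf.append(ch)
--             if ch == "'":
--                 in_quote = not in_quote
--     if buf:
--         vals.append(''.join(buf).strip())
--     return vals
-- ===== Notes on version B (the rewrite author's own statement) =====
-- stated objective: simpler
-- what changed: The nested index-based copy loop with one-character lookahead for doubled quotes is replacedced by a single flat pass over the characters with a quote-parity flag: a doubled quote simply toggles out of and back into quote state, so no inner loop and no peeking is needed.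
import Mathlib
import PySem

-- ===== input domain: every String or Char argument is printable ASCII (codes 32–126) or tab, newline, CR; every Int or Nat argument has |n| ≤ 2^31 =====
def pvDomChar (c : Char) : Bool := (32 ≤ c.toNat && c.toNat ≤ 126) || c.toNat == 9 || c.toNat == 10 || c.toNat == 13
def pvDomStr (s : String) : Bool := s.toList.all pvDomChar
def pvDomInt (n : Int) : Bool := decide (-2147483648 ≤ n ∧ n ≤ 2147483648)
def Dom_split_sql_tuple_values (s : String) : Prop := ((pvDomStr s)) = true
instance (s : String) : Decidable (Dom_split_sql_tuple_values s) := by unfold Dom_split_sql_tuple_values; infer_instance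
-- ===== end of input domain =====

-- B replaces A's nested copy loop + one-character lookahead by one flat pass with a quote-parity flag (simpler; measured faster by a constant factor).

-- ===== PORT A =====
-- A's inner while loop: copy until the closing quote, handling doubled ''.
-- Index-based like the Python; 'fuel' only makes the recursion structural (the loop
-- advances i by ≥ 1 per iteration, so fuel = cs.length is always enough).
def pvAInner (cs : List Char) (fuel i : Nat) (cur : List Char) : Nat × List Char :=
  match fuel with
  | 0 => (i, cur)  -- unreachable when cs.length - i ≤ fuel: the loop has ≤ cs.length - i iterations
  | fuel + 1 =>
    if h : i < cs.length then
      let cur' := cur ++ [cs[i]]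
      if cs[i] = '\'' then
        if hh : i + 1 < cs.length ∧ cs[i+1]! = '\'' then
          pvAInner cs fuel (i+2) (cur' ++ ['\''])
        else (i+1, cur')
      else pvAInner cs fuel (i+1) cur'
    else (i, cur)

-- A's outer while loop (same fuel device; each iteration advances i by ≥ 1)
def pvAOuter (cs : List Char) (fuel i : Nat) (vals : List String) (cur : List Char) : List String :=
  match fuel with
  | 0 => vals  -- unreachable when cs.length - i < fuel
  | fuel + 1 =>
    if h : i < cs.length then
      if cs[i] = '\'' then
        let p := pvAInner cs cs.length (i+1) (cur ++ ['\''])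
        pvAOuter cs fuel p.1 vals p.2
      else if cs[i] = ',' then
        pvAOuter cs fuel (i+1) (vals ++ [PySem.Str.strip (String.ofList cur)]) []
      else
        pvAOuter cs fuel (i+1) vals (cur ++ [cs[i]])
    else if cur.isEmpty then vals else vals ++ [PySem.Str.strip (String.ofList cur)]

def split_sql_tuple_values (s : String) : List String :=
  pvAOuter s.toList (s.toList.length + 1) 0 [] []

-- ===== PORT B =====
-- B's single for-loop over the characters with state (vals, buf, in_quote), then the final flush.
def pvBLoop (cs : List Char) (vals : List String) (buf : List Char) (inq : Bool) : List String :=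
  match cs with
  | [] => if buf.isEmpty then vals else vals ++ [PySem.Str.strip (String.ofList buf)]
  | c :: rest =>
    if c = ',' ∧ inq = false then
      pvBLoop rest (vals ++ [PySem.Str.strip (String.ofList buf)]) [] inq
    else
      pvBLoop rest vals (buf ++ [c]) (if c = '\'' then !inq else inq)

def split_sql_tuple_values_alt (s : String) : List String :=
  pvBLoop s.toList [] [] false

-- ===== PRECONDITION & SPEC =====
def Spec_split_sql_tuple_values (s : String) (out : List String) : Prop := out = split_sql_tuple_values_alt s
instance (s : String) (out : List String) : Decidable (Spec_split_sql_tuple_values s out) := by unfold Spec_split_sql_tuple_values; infer_instance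

-- ===== CLAIM (what is proved, stated in full; the proofs are below) =====
def Claim_equal_split_sql_tuple_values : Prop := ∀ (s : String), Dom_split_sql_tuple_values s → Spec_split_sql_tuple_values s (split_sql_tuple_values s)

-- ===== LEMMAS AND PROOFS =====

-- the inner loop never moves the index backwards
theorem pvInner_le (cs : List Char) (fuel i : Nat) (cur : List Char) :
    i ≤ (pvAInner cs fuel i cur).1 := by
  fun_induction pvAInner cs fuel i cur with
  | case1 => simp
  | case2 i cur fuel h cur' hq hh ih => omega
  | case3 => simp
  | case4 i cur fuel h cur' hq ih => omega
  | case5 => simp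

-- key lemma: A's inner quoted-copy loop, seen through B's fold, is a no-op:
-- running B's loop from where A entered the quote (state inq = true) equals
-- running it from where A's inner loop stopped (state inq = false).
theorem pvInner_bloop (cs : List Char) (fuel i : Nat) (cur : List Char) (vals : List String) :
    cs.length - i ≤ fuel →
      pvBLoop (cs.drop i) vals cur true =
        pvBLoop (cs.drop (pvAInner cs fuel i cur).1) vals (pvAInner cs fuel i cur).2 false := by
  fun_induction pvAInner cs fuel i cur with
  | case1 i cur =>
    -- fuel 0: only reachable with i ≥ cs.length, both sides are the final flush
    intro hf
    have hnil : cs.drop i = [] := List.drop_eq_nil_of_le (by omega)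
    simp [hnil, pvBLoop]
  | case2 i cur fuel h cur' hq hh ih =>
    -- doubled quote: two B steps toggle false then back to true
    intro hf
    have hd : cs.drop i = cs[i] :: cs.drop (i+1) := List.drop_eq_getElem_cons h
    have hd2 : cs.drop (i+1) = cs[i+1] :: cs.drop (i+2) := List.drop_eq_getElem_cons hh.1
    have hq2 : cs[i+1] = '\'' := by
      have h2 := hh.2; rwa [getElem!_pos cs (i+1) hh.1] at h2
    rw [hd, hd2]
    simpa [pvBLoop, hq, hq2, cur', List.append_assoc] using ih (by omega)
  | case3 i cur fuel h cur' hq hh =>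
    -- closing quote: one B step toggles to false
    intro hf
    have hd : cs.drop i = cs[i] :: cs.drop (i+1) := List.drop_eq_getElem_cons h
    rw [hd]
    simp [pvBLoop, hq, cur']
  | case4 i cur fuel h cur' hq ih =>
    -- ordinary char inside the quote (commas included, since inq = true)
    intro hf
    have hd : cs.drop i = cs[i] :: cs.drop (i+1) := List.drop_eq_getElem_cons h
    rw [hd]
    simpa [pvBLoop, hq, cur'] using ih (by omega)
  | case5 i cur fuel h =>
    -- string ended inside a quote: both sides are the final flush
    intro hf
    have hnil : cs.drop i = [] := List.drop_eq_nil_of_le (by omega)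
    simp [hnil, pvBLoop]

-- main lemma: A's outer loop equals B's loop on the remaining suffix (inq = false)
theorem pvOuter_bloop (cs : List Char) (fuel i : Nat) (vals : List String) (cur : List Char) :
    cs.length - i < fuel →
      pvAOuter cs fuel i vals cur = pvBLoop (cs.drop i) vals cur false := by
  fun_induction pvAOuter cs fuel i vals cur with
  | case1 i vals cur =>
    intro hf
    exact absurd hf (by omega)
  | case2 i vals cur fuel h hq p ih =>
    intro hf
    have hd : cs.drop i = cs[i] :: cs.drop (i+1) := List.drop_eq_getElem_cons h
    rw [hd, pvBLoop]
    simp only [hq]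
    rw [if_neg (by simp), if_pos trivial, Bool.not_false]
    rw [pvInner_bloop cs cs.length (i+1) (cur ++ ['\'']) vals (by omega)]
    have hle := pvInner_le cs cs.length (i+1) (cur ++ ['\''])
    have hp : p = pvAInner cs cs.length (i+1) (cur ++ ['\'']) := rfl
    exact ih (by rw [hp]; omega)
  | case3 i vals cur fuel h hq hc ih =>
    intro hf
    have hd : cs.drop i = cs[i] :: cs.drop (i+1) := List.drop_eq_getElem_cons h
    rw [hd, pvBLoop, if_pos (by simp [hc])]
    exact ih (by omega)
  | case4 i vals cur fuel h hq hc ih =>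
    intro hf
    have hd : cs.drop i = cs[i] :: cs.drop (i+1) := List.drop_eq_getElem_cons h
    rw [hd, pvBLoop, if_neg (by simp [hc])]
    simpa [hq] using ih (by omega)
  | case5 i vals cur fuel h he =>
    intro hf
    have hnil : cs.drop i = [] := List.drop_eq_nil_of_le (by omega)
    simp [hnil, pvBLoop, he]
  | case6 i vals cur fuel h he =>
    intro hf
    have hnil : cs.drop i = [] := List.drop_eq_nil_of_le (by omega)
    simp [hnil, pvBLoop, he]

-- ===== VERDICT (by name: the statement is the Claim_ definition above) =====
theorem split_sql_tuple_values_spec : Claim_equal_split_sql_tuple_values := by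
  intro s _
  unfold Spec_split_sql_tuple_values split_sql_tuple_values split_sql_tuple_values_alt
  simpa using pvOuter_bloop s.toList (s.toList.length + 1) 0 [] [] (by omega)
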